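-- pv_equiv track=rewrite | github.com/edimauro5/Information_Theory_Huffman-LempelZiv_Lloyd-Max_Luby | Lloyd_Max/Codes_Implementation/lloyd_max.py | quantize_samples
-- ===== SOURCE A (Python) =====
-- def quantize_samples(samples, level_extremes):
--     samples_quantized = []
--     for x in samples:
--         for level in level_extremes.keys():
--             extremes = level_extremes[level]
--             if extremes[0] <= x < extremes[1]:
--                 samples_quantized.append(level)
--     return samples_quantized
-- ===== SOURCE B (Python) =====
-- def quantize_samples(samples, level_extremes):
--     # Memoized: the matching-levels list is computed once per DISTINCT sample value
--     # via a hash cache, instead of re-scanning all levels for every sample.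
--     items = list(level_extremes.items())
--     cache = {}
--     out = []
--     for x in samples:
--         if x not in cache:
--             cache[x] = [level for level, extremes in items if extremes[0] <= x < extremes[1]]
--         out.extend(cache[x])
--     return out
-- ===== Notes on version B (the rewrite author's own statement) =====
-- stated objective: alternative
-- what changed: B extracts the items once and memoizes the matching-levels list per distinct sample value in a hash cache, so the level scan runs once per distinct value instead of once per sample (A also performs a dict lookup per (sample, key) pair; B performs none).
import Mathlib
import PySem

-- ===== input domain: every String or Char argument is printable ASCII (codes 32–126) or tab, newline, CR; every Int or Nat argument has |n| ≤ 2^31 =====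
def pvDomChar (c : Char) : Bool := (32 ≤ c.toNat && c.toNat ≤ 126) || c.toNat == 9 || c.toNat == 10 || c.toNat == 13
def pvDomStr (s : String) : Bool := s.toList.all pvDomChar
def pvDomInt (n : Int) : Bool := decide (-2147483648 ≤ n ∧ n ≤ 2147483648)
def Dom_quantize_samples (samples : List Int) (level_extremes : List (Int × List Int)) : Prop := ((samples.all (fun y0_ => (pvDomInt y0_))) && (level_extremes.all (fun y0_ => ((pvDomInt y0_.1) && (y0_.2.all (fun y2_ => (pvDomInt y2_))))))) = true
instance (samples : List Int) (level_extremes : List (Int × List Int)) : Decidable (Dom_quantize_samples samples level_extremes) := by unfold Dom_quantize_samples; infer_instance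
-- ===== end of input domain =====

-- B memoizes the matching-levels list per distinct sample value in a hash cache instead of
-- re-scanning all levels for every sample (objective: alternative; same return value).

-- ===== PORT A =====
-- A: for each sample x, scan all levels (dict keys in order, each key paired with its value)
-- and append every level whose interval contains x.  'extremes[0] <= x < extremes[1]' is
-- short-circuit: extremes[1] is only accessed when extremes[0] <= x; the 'none' cases of
-- pyGet? are exactly where Python raises IndexError (excluded by Pre_).
def quantize_samples (samples : List Int) (level_extremes : List (Int × List Int)) : List Int :=
  samples.foldl (fun samples_quantized x =>
    level_extremes.foldl (fun acc lv =>
      match PySem.List.pyGet? lv.2 0 with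
      | none => acc
      | some lo =>
        if lo ≤ x then
          match PySem.List.pyGet? lv.2 1 with
          | none => acc
          | some hi => if x < hi then acc ++ [lv.1] else acc
        else acc) samples_quantized) []

-- ===== PORT B =====
-- the comprehension [level for level, extremes in items if extremes[0] <= x < extremes[1]]
def pvMatchesB (x : Int) (items : List (Int × List Int)) : List Int :=
  items.foldl (fun acc lv =>
    match PySem.List.pyGet? lv.2 0 with
    | none => acc
    | some lo =>
      if lo ≤ x then
        match PySem.List.pyGet? lv.2 1 with
        | none => acc
        | some hi => if x < hi then acc ++ [lv.1] else acc
      else acc) []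

-- the cache loop: state = (cache, out); 'if x not in cache: cache[x] = …'; 'out.extend(cache[x])'
def quantize_samples_alt (samples : List Int) (level_extremes : List (Int × List Int)) : List Int :=
  (samples.foldl (fun (st : PySem.Dict Int (List Int) × List Int) x =>
      let cache := if st.1.contains x then st.1 else st.1.insert x (pvMatchesB x level_extremes)
      (cache, st.2 ++ cache.getD x [])) (PySem.Dict.empty, [])).2

-- ===== PRECONDITION & SPEC =====
-- Pre_ excludes exactly the inputs on which A raises IndexError: some level's extremes list
-- is reached (samples nonempty) and has no element 0, or has exactly one element whose value
-- is ≤ some sample (so the short-circuit accesses the missing element 1).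
def Pre_quantize_samples (samples : List Int) (level_extremes : List (Int × List Int)) : Prop :=
  samples = [] ∨ ∀ p ∈ level_extremes,
    2 ≤ p.2.length ∨ (p.2.length = 1 ∧ ∀ x ∈ samples, x < p.2.getD 0 0)
instance (samples : List Int) (level_extremes : List (Int × List Int)) : Decidable (Pre_quantize_samples samples level_extremes) := by unfold Pre_quantize_samples; infer_instance
def pvWitness_quantize_samples : List Int × (List (Int × List Int)) := ([1, 7, 1], [(0, [0, 5]), (1, [5, 10])])

def Spec_quantize_samples (samples : List Int) (level_extremes : List (Int × List Int)) (out : List Int) : Prop := out = quantize_samples_alt samples level_extremes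
instance (samples : List Int) (level_extremes : List (Int × List Int)) (out : List Int) : Decidable (Spec_quantize_samples samples level_extremes out) := by unfold Spec_quantize_samples; infer_instance

-- ===== CLAIM (what is proved, stated in full; the proofs are below) =====
def Claim_equal_quantize_samples : Prop := ∀ (samples : List Int) (level_extremes : List (Int × List Int)), Dom_quantize_samples samples level_extremes → Pre_quantize_samples samples level_extremes → Spec_quantize_samples samples level_extremes (quantize_samples samples level_extremes)

-- ===== LEMMAS AND PROOFS =====

-- the per-pair contribution of both inner scans
def pvHit (x : Int) (lv : Int × List Int) : List Int :=
  match PySem.List.pyGet? lv.2 0 with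
  | none => []
  | some lo =>
    if lo ≤ x then
      match PySem.List.pyGet? lv.2 1 with
      | none => []
      | some hi => if x < hi then [lv.1] else []
    else []

lemma inner_foldl_eq (x : Int) (les : List (Int × List Int)) (acc : List Int) :
    les.foldl (fun acc lv =>
      match PySem.List.pyGet? lv.2 0 with
      | none => acc
      | some lo =>
        if lo ≤ x then
          match PySem.List.pyGet? lv.2 1 with
          | none => acc
          | some hi => if x < hi then acc ++ [lv.1] else acc
        else acc) acc = acc ++ les.flatMap (pvHit x) := by
  induction les generalizing acc with
  | nil => simp
  | cons lv t ih =>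
    simp only [List.foldl_cons, List.flatMap_cons, ih]
    have hstep : (match PySem.List.pyGet? lv.2 0 with
      | none => acc
      | some lo =>
        if lo ≤ x then
          match PySem.List.pyGet? lv.2 1 with
          | none => acc
          | some hi => if x < hi then acc ++ [lv.1] else acc
        else acc) = acc ++ pvHit x lv := by
      unfold pvHit
      cases PySem.List.pyGet? lv.2 0 with
      | none => simp
      | some lo =>
        by_cases h1 : lo ≤ x
        · simp only [h1, if_true]
          cases PySem.List.pyGet? lv.2 1 with
          | none => simp
          | some hi => by_cases h2 : x < hi <;> simp [h2]
        · simp [h1]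
    rw [hstep, List.append_assoc]

lemma pvMatchesB_eq (x : Int) (les : List (Int × List Int)) :
    pvMatchesB x les = les.flatMap (pvHit x) := by
  unfold pvMatchesB
  simpa using inner_foldl_eq x les []

lemma quantize_samples_eq_flatMap (samples : List Int) (les : List (Int × List Int)) :
    quantize_samples samples les = samples.flatMap (fun x => les.flatMap (pvHit x)) := by
  unfold quantize_samples
  suffices h : ∀ acc, samples.foldl (fun samples_quantized x =>
      les.foldl (fun acc lv =>
        match PySem.List.pyGet? lv.2 0 with
        | none => acc
        | some lo =>
          if lo ≤ x then
            match PySem.List.pyGet? lv.2 1 with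
            | none => acc
            | some hi => if x < hi then acc ++ [lv.1] else acc
          else acc) samples_quantized) acc
      = acc ++ samples.flatMap (fun x => les.flatMap (pvHit x)) by
    simpa using h []
  induction samples with
  | nil => intro acc; simp
  | cons x t ih =>
    intro acc
    rw [List.foldl_cons, ih, inner_foldl_eq, List.flatMap_cons, List.append_assoc]

-- cache invariant: every cached value is the matching-levels list of its key
lemma alt_loop_eq (les : List (Int × List Int)) (samples : List Int)
    (cache : PySem.Dict Int (List Int)) (out : List Int)
    (hinv : ∀ k v, cache.get? k = some v → v = pvMatchesB k les) :
    (samples.foldl (fun (st : PySem.Dict Int (List Int) × List Int) x =>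
      let cache := if st.1.contains x then st.1 else st.1.insert x (pvMatchesB x les)
      (cache, st.2 ++ cache.getD x [])) (cache, out)).2
    = out ++ samples.flatMap (fun x => pvMatchesB x les) := by
  induction samples generalizing cache out with
  | nil => simp
  | cons x t ih =>
    simp only [List.foldl_cons, List.flatMap_cons]
    by_cases hc : cache.contains x = true
    · have hsome : (cache.get? x).isSome := by
        rw [← PySem.Dict.contains_eq_isSome_get?]; exact hc
      obtain ⟨v, hv⟩ := Option.isSome_iff_exists.mp hsome
      have hval : cache.getD x [] = pvMatchesB x les := by
        rw [PySem.Dict.getD_eq_get?_getD, hv, Option.getD_some]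
        exact hinv x v hv
      simp only [hc, if_true, hval]
      rw [ih cache _ hinv, List.append_assoc]
    · simp only [hc]
      have hval : (cache.insert x (pvMatchesB x les)).getD x [] = pvMatchesB x les := by
        simp [PySem.Dict.getD_insert_self]
      have hinv' : ∀ k v, (cache.insert x (pvMatchesB x les)).get? k = some v →
          v = pvMatchesB k les := by
        intro k v hv
        by_cases hk : k = x
        · subst hk
          rw [PySem.Dict.get?_insert_self] at hv
          exact (Option.some.inj hv).symm
        · rw [PySem.Dict.get?_insert_of_ne _ _ hk] at hv
          exact hinv k v hv
      simp only [Bool.false_eq_true, if_false, hval]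
      rw [ih _ _ hinv', List.append_assoc]

-- ===== VERDICT (by name: the statement is the Claim_ definition above) =====
theorem quantize_samples_spec : Claim_equal_quantize_samples := by
  intro samples les _hdom _hpre
  unfold Spec_quantize_samples quantize_samples_alt
  rw [quantize_samples_eq_flatMap]
  rw [alt_loop_eq les samples PySem.Dict.empty [] (by intro k v hv; simp [PySem.Dict.get?_empty] at hv)]
  simp [pvMatchesB_eq]
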